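-- pv_equiv track=rewrite | github.com/natwar86/signal-listener | scripts/apollo_enrich.py | pick_best_person
-- ===== SOURCE A (Python) =====
-- def pick_best_person(people: list[dict]) -> dict | None:
--     """Pick the best decision-maker from search results."""
--     if not people:
--         return None
--
--     # Score by title relevance
--     def title_score(person):
--         title = (person.get("title") or "").lower()
--         if any(t in title for t in ["founder", "co-founder", "cofounder", "owner"]):
--             return 0
--         if any(t in title for t in ["ceo", "chief executive", "president"]):
--             return 1
--         if any(t in title for t in ["director", "head of", "vp"]):
--             return 2
--         if "manager" in title:
--             return 3
--         return 4
--
--     scored = sorted(people, key=title_score)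
--     return scored[0]
-- ===== SOURCE B (Python) =====
-- TIERS = [
--     ["founder", "co-founder", "cofounder", "owner"],
--     ["ceo", "chief executive", "president"],
--     ["director", "head of", "vp"],
--     ["manager"],
-- ]
--
--
-- def pick_best_person(people: list[dict]) -> dict | None:
--     """Pick the best decision-maker: scan priority tiers in order, return the
--     first person (original order) whose title matches the tier; else the first person."""
--     if not people:
--         return None
--     for tier in TIERS:
--         for person in people:
--             title = (person.get("title") or "").lower()
--             if any(k in title for k in tier):
--                 return person
--     return people[0]
-- ===== Notes on version B (the rewrite author's own statement) =====
-- stated objective: alternative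
-- what changed: Replaces scoring every person and stably sorting the whole list with a tiered search: scan the ordered keyword tiers and return the first person (in original order) matching the current tier, falling back to the first person; no scores, no sort.
import Mathlib
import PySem

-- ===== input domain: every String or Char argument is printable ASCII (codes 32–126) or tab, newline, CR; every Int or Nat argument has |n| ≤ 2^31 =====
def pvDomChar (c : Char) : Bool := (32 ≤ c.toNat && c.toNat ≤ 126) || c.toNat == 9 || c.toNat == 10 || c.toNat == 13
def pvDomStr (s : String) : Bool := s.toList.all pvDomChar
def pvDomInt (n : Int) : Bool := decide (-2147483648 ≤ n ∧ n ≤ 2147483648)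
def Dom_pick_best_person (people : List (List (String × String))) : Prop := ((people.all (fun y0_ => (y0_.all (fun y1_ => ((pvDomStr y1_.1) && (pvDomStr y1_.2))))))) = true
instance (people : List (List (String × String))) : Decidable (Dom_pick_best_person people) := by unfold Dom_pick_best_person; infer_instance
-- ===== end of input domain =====

-- B replaces A's score-every-person-and-stably-sort by an ordered tier scan returning the first matching person (objective: alternative, no sort).

-- shared helper: title = (person.get("title") or "").lower()  (both Pythons compute this line identically)
def pvLowTitle (person : List (String × String)) : String :=
  PySem.Str.lower (match person.find? (fun kv => kv.1 == "title") with
                   | some kv => kv.2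
                   | none => "")

-- ===== PORT A =====
def pvTitleScore (person : List (String × String)) : Nat :=
  if (["founder", "co-founder", "cofounder", "owner"].any (fun t => PySem.Str.isIn t (pvLowTitle person))) then 0
  else if (["ceo", "chief executive", "president"].any (fun t => PySem.Str.isIn t (pvLowTitle person))) then 1
  else if (["director", "head of", "vp"].any (fun t => PySem.Str.isIn t (pvLowTitle person))) then 2
  else if PySem.Str.isIn "manager" (pvLowTitle person) then 3
  else 4

def pick_best_person (people : List (List (String × String))) : Option (List (String × String)) :=
  match people with
  | [] => none
  | _ => (PySem.List.sorted people pvTitleScore false).head?   -- scored = sorted(people, key=title_score); return scored[0]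

-- ===== PORT B =====
def pvTiers : List (List String) :=
  [["founder", "co-founder", "cofounder", "owner"],
   ["ceo", "chief executive", "president"],
   ["director", "head of", "vp"],
   ["manager"]]

def pvTierMatch (tier : List String) (person : List (String × String)) : Bool :=
  tier.any (fun k => PySem.Str.isIn k (pvLowTitle person))

def pick_best_person_alt (people : List (List (String × String))) : Option (List (String × String)) :=
  match people with
  | [] => none
  | p0 :: _ =>
    match pvTiers.findSome? (fun tier => people.find? (fun q => pvTierMatch tier q)) with
    | some q => some q
    | none => some p0

-- ===== PRECONDITION & SPEC =====
def Spec_pick_best_person (people : List (List (String × String))) (out : Option (List (String × String))) : Prop := out = pick_best_person_alt people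
instance (people : List (List (String × String))) (out : Option (List (String × String))) : Decidable (Spec_pick_best_person people out) := by unfold Spec_pick_best_person; infer_instance

-- ===== CLAIM (what is proved, stated in full; the proofs are below) =====
def Claim_equal_pick_best_person : Prop := ∀ (people : List (List (String × String))), Dom_pick_best_person people → Spec_pick_best_person people (pick_best_person people)

-- ===== LEMMAS AND PROOFS =====

-- first element of p :: ps attaining the minimal pvTitleScore (A's stable-sort head)
def pvFm (p : List (String × String)) : List (List (String × String)) → List (String × String)
  | [] => p
  | x :: xs => if pvTitleScore x < pvTitleScore p then pvFm x xs else pvFm p xs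

theorem pvHead_foldl_insertBy (xs : List (List (String × String))) :
    ∀ (h : List (String × String)) (t : List (List (String × String))),
      (List.foldl (fun acc x => PySem.List.insertBy (fun a b => decide (pvTitleScore a < pvTitleScore b)) x acc) (h :: t) xs).head?
        = some (pvFm h xs) := by
  induction xs with
  | nil => intro h t; rfl
  | cons x xs ih =>
    intro h t
    simp only [List.foldl_cons, PySem.List.insertBy, pvFm]
    by_cases hc : pvTitleScore x < pvTitleScore h
    · simp [hc, ih]
    · simp [hc, ih]

theorem pvA_eq_fm (p : List (String × String)) (ps : List (List (String × String))) :
    pick_best_person (p :: ps) = some (pvFm p ps) := by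
  show (PySem.List.sorted (p :: ps) pvTitleScore false).head? = some (pvFm p ps)
  rw [PySem.List.sorted_eq_foldl_insertBy]
  simpa using pvHead_foldl_insertBy ps p []

theorem pvFm_le (ps : List (List (String × String))) :
    ∀ p, pvTitleScore (pvFm p ps) ≤ pvTitleScore p ∧
      ∀ x ∈ ps, pvTitleScore (pvFm p ps) ≤ pvTitleScore x := by
  induction ps with
  | nil => intro p; simp [pvFm]
  | cons x xs ih =>
    intro p
    simp only [pvFm]
    by_cases hc : pvTitleScore x < pvTitleScore p
    · rw [if_pos hc]
      refine ⟨le_trans (ih x).1 (le_of_lt hc), ?_⟩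
      intro y hy
      rcases List.mem_cons.mp hy with hy | hy
      · rw [hy]; exact (ih x).1
      · exact (ih x).2 y hy
    · rw [if_neg hc]
      refine ⟨(ih p).1, ?_⟩
      intro y hy
      rcases List.mem_cons.mp hy with hy | hy
      · rw [hy]; exact le_trans (ih p).1 (Nat.le_of_not_lt hc)
      · exact (ih p).2 y hy

theorem pvFm_self (ps : List (List (String × String))) :
    ∀ p, (∀ x ∈ ps, pvTitleScore p ≤ pvTitleScore x) → pvFm p ps = p := by
  induction ps with
  | nil => intro p _; rfl
  | cons x xs ih =>
    intro p h
    simp only [pvFm]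
    rw [if_neg (Nat.not_lt.mpr (h x (by simp)))]
    exact ih p (fun y hy => h y (by simp [hy]))

theorem pvFm_find (ps : List (List (String × String))) :
    ∀ p, (p :: ps).find? (fun q => pvTitleScore q == pvTitleScore (pvFm p ps)) = some (pvFm p ps) := by
  induction ps with
  | nil => intro p; simp [pvFm]
  | cons x xs ih =>
    intro p
    by_cases hp : pvTitleScore p = pvTitleScore (pvFm p (x :: xs))
    · have hmin : ∀ y ∈ x :: xs, pvTitleScore p ≤ pvTitleScore y := by
        intro y hy; rw [hp]; exact (pvFm_le (x :: xs) p).2 y hy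
      have hfx : pvFm p (x :: xs) = p := pvFm_self (x :: xs) p hmin
      rw [hfx]
      apply List.find?_cons_of_pos
      simp
    · have hle : pvTitleScore (pvFm p (x :: xs)) ≤ pvTitleScore p := (pvFm_le (x :: xs) p).1
      rw [List.find?_cons_of_neg (by simpa using hp)]
      simp only [pvFm] at *
      by_cases hc : pvTitleScore x < pvTitleScore p
      · rw [if_pos hc] at *
        exact ih x
      · rw [if_neg hc] at *
        have hxne : ¬ (pvTitleScore x = pvTitleScore (pvFm p xs)) := by
          have hpx : pvTitleScore p ≤ pvTitleScore x := Nat.le_of_not_lt hc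
          omega
        rw [List.find?_cons_of_neg (by simpa using hxne)]
        have hih := ih p
        rw [List.find?_cons_of_neg (by simpa using hp)] at hih
        exact hih

theorem pvFind?_congr (f g : List (String × String) → Bool) :
    ∀ (xs : List (List (String × String))), (∀ x ∈ xs, f x = g x) → xs.find? f = xs.find? g := by
  intro xs
  induction xs with
  | nil => intro _; rfl
  | cons x xs ih =>
    intro h
    rw [List.find?, List.find?, h x (by simp)]
    cases g x
    · exact ih (fun y hy => h y (by simp [hy]))
    · rfl

theorem pvScore_unfold (q : List (String × String)) :
    pvTitleScore q =
      if pvTierMatch ["founder", "co-founder", "cofounder", "owner"] q then 0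
      else if pvTierMatch ["ceo", "chief executive", "president"] q then 1
      else if pvTierMatch ["director", "head of", "vp"] q then 2
      else if pvTierMatch ["manager"] q then 3
      else 4 := by
  simp only [pvTitleScore, pvTierMatch, List.any_cons, List.any_nil, Bool.or_false]

theorem pvScore_le_4 (q : List (String × String)) : pvTitleScore q ≤ 4 := by
  rw [pvScore_unfold]; split_ifs <;> omega

theorem pvM0 (q : List (String × String)) :
    pvTierMatch ["founder", "co-founder", "cofounder", "owner"] q = true → pvTitleScore q = 0 := by
  intro hb; rw [pvScore_unfold q, hb]; simp

theorem pvM1 (q : List (String × String)) :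
    pvTierMatch ["ceo", "chief executive", "president"] q = true → pvTitleScore q ≤ 1 := by
  intro hb; rw [pvScore_unfold q, hb]; split_ifs <;> first | omega | simp_all

theorem pvM2 (q : List (String × String)) :
    pvTierMatch ["director", "head of", "vp"] q = true → pvTitleScore q ≤ 2 := by
  intro hb; rw [pvScore_unfold q, hb]; split_ifs <;> first | omega | simp_all

theorem pvM3 (q : List (String × String)) :
    pvTierMatch ["manager"] q = true → pvTitleScore q ≤ 3 := by
  intro hb; rw [pvScore_unfold q, hb]; split_ifs <;> first | omega | simp_all

-- once no earlier tier matches, tier-k membership is exactly "score = k"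
theorem pvTier_eq_score0 (q : List (String × String)) :
    pvTierMatch ["founder", "co-founder", "cofounder", "owner"] q = (pvTitleScore q == 0) := by
  cases hb : pvTierMatch ["founder", "co-founder", "cofounder", "owner"] q
  · rw [pvScore_unfold q, hb]; split_ifs <;> simp_all
  · rw [pvScore_unfold q, hb]; simp

theorem pvTier_eq_score1 (q : List (String × String))
    (h0 : pvTierMatch ["founder", "co-founder", "cofounder", "owner"] q = false) :
    pvTierMatch ["ceo", "chief executive", "president"] q = (pvTitleScore q == 1) := by
  cases hb : pvTierMatch ["ceo", "chief executive", "president"] q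
  · rw [pvScore_unfold q, h0, hb]; split_ifs <;> simp_all
  · rw [pvScore_unfold q, h0, hb]; simp

theorem pvTier_eq_score2 (q : List (String × String))
    (h0 : pvTierMatch ["founder", "co-founder", "cofounder", "owner"] q = false)
    (h1 : pvTierMatch ["ceo", "chief executive", "president"] q = false) :
    pvTierMatch ["director", "head of", "vp"] q = (pvTitleScore q == 2) := by
  cases hb : pvTierMatch ["director", "head of", "vp"] q
  · rw [pvScore_unfold q, h0, h1, hb]; split_ifs <;> simp_all
  · rw [pvScore_unfold q, h0, h1, hb]; simp

theorem pvTier_eq_score3 (q : List (String × String))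
    (h0 : pvTierMatch ["founder", "co-founder", "cofounder", "owner"] q = false)
    (h1 : pvTierMatch ["ceo", "chief executive", "president"] q = false)
    (h2 : pvTierMatch ["director", "head of", "vp"] q = false) :
    pvTierMatch ["manager"] q = (pvTitleScore q == 3) := by
  cases hb : pvTierMatch ["manager"] q
  · rw [pvScore_unfold q, h0, h1, h2, hb]; simp
  · rw [pvScore_unfold q, h0, h1, h2, hb]; simp

theorem pvB_eq_fm (p : List (String × String)) (ps : List (List (String × String))) :
    pick_best_person_alt (p :: ps) = some (pvFm p ps) := by
  obtain ⟨hminp, hmins⟩ := pvFm_le ps p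
  have hfind := pvFm_find ps p
  have hk4 := pvScore_le_4 (pvFm p ps)
  have hmin : ∀ x ∈ p :: ps, pvTitleScore (pvFm p ps) ≤ pvTitleScore x := by
    intro x hx
    rcases List.mem_cons.mp hx with hx | hx
    · subst hx; exact hminp
    · exact hmins x hx
  show (match pvTiers.findSome? (fun tier => (p :: ps).find? (fun q => pvTierMatch tier q)) with
        | some q => some q
        | none => some p) = some (pvFm p ps)
  simp only [pvTiers, List.findSome?_cons, List.findSome?_nil]
  generalize hgen : pvTitleScore (pvFm p ps) = k at hfind hmin hk4
  interval_cases k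
  · -- minimal score 0: tier 0 finds pvFm p ps
    have e0 : (p :: ps).find? (fun q => pvTierMatch ["founder", "co-founder", "cofounder", "owner"] q) = some (pvFm p ps) := by
      rw [pvFind?_congr _ (fun q => pvTitleScore q == 0) (p :: ps) (fun q _ => pvTier_eq_score0 q)]
      exact hfind
    simp only [e0]
  · -- minimal score 1
    have n0 : ∀ q ∈ p :: ps, pvTierMatch ["founder", "co-founder", "cofounder", "owner"] q = false := by
      intro q hq
      cases hb : pvTierMatch ["founder", "co-founder", "cofounder", "owner"] q
      · rfl
      · exfalso; have := pvM0 q hb; have := hmin q hq; omega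
    have e0 : (p :: ps).find? (fun q => pvTierMatch ["founder", "co-founder", "cofounder", "owner"] q) = none :=
      List.find?_eq_none.mpr (fun q hq => by simp [n0 q hq])
    have e1 : (p :: ps).find? (fun q => pvTierMatch ["ceo", "chief executive", "president"] q) = some (pvFm p ps) := by
      rw [pvFind?_congr _ (fun q => pvTitleScore q == 1) (p :: ps) (fun q hq => pvTier_eq_score1 q (n0 q hq))]
      exact hfind
    simp only [e0, e1]
  · -- minimal score 2
    have n0 : ∀ q ∈ p :: ps, pvTierMatch ["founder", "co-founder", "cofounder", "owner"] q = false := by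
      intro q hq
      cases hb : pvTierMatch ["founder", "co-founder", "cofounder", "owner"] q
      · rfl
      · exfalso; have := pvM0 q hb; have := hmin q hq; omega
    have n1 : ∀ q ∈ p :: ps, pvTierMatch ["ceo", "chief executive", "president"] q = false := by
      intro q hq
      cases hb : pvTierMatch ["ceo", "chief executive", "president"] q
      · rfl
      · exfalso; have := pvM1 q hb; have := hmin q hq; omega
    have e0 : (p :: ps).find? (fun q => pvTierMatch ["founder", "co-founder", "cofounder", "owner"] q) = none :=
      List.find?_eq_none.mpr (fun q hq => by simp [n0 q hq])
    have e1 : (p :: ps).find? (fun q => pvTierMatch ["ceo", "chief executive", "president"] q) = none :=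
      List.find?_eq_none.mpr (fun q hq => by simp [n1 q hq])
    have e2 : (p :: ps).find? (fun q => pvTierMatch ["director", "head of", "vp"] q) = some (pvFm p ps) := by
      rw [pvFind?_congr _ (fun q => pvTitleScore q == 2) (p :: ps) (fun q hq => pvTier_eq_score2 q (n0 q hq) (n1 q hq))]
      exact hfind
    simp only [e0, e1, e2]
  · -- minimal score 3
    have n0 : ∀ q ∈ p :: ps, pvTierMatch ["founder", "co-founder", "cofounder", "owner"] q = false := by
      intro q hq
      cases hb : pvTierMatch ["founder", "co-founder", "cofounder", "owner"] q
      · rfl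
      · exfalso; have := pvM0 q hb; have := hmin q hq; omega
    have n1 : ∀ q ∈ p :: ps, pvTierMatch ["ceo", "chief executive", "president"] q = false := by
      intro q hq
      cases hb : pvTierMatch ["ceo", "chief executive", "president"] q
      · rfl
      · exfalso; have := pvM1 q hb; have := hmin q hq; omega
    have n2 : ∀ q ∈ p :: ps, pvTierMatch ["director", "head of", "vp"] q = false := by
      intro q hq
      cases hb : pvTierMatch ["director", "head of", "vp"] q
      · rfl
      · exfalso; have := pvM2 q hb; have := hmin q hq; omega
    have e0 : (p :: ps).find? (fun q => pvTierMatch ["founder", "co-founder", "cofounder", "owner"] q) = none :=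
      List.find?_eq_none.mpr (fun q hq => by simp [n0 q hq])
    have e1 : (p :: ps).find? (fun q => pvTierMatch ["ceo", "chief executive", "president"] q) = none :=
      List.find?_eq_none.mpr (fun q hq => by simp [n1 q hq])
    have e2 : (p :: ps).find? (fun q => pvTierMatch ["director", "head of", "vp"] q) = none :=
      List.find?_eq_none.mpr (fun q hq => by simp [n2 q hq])
    have e3 : (p :: ps).find? (fun q => pvTierMatch ["manager"] q) = some (pvFm p ps) := by
      rw [pvFind?_congr _ (fun q => pvTitleScore q == 3) (p :: ps) (fun q hq => pvTier_eq_score3 q (n0 q hq) (n1 q hq) (n2 q hq))]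
      exact hfind
    simp only [e0, e1, e2, e3]
  · -- minimal score 4: no tier matches anyone, B falls back to the head, which is pvFm p ps
    have n0 : ∀ q ∈ p :: ps, pvTierMatch ["founder", "co-founder", "cofounder", "owner"] q = false := by
      intro q hq
      cases hb : pvTierMatch ["founder", "co-founder", "cofounder", "owner"] q
      · rfl
      · exfalso; have := pvM0 q hb; have := hmin q hq; omega
    have n1 : ∀ q ∈ p :: ps, pvTierMatch ["ceo", "chief executive", "president"] q = false := by
      intro q hq
      cases hb : pvTierMatch ["ceo", "chief executive", "president"] q
      · rfl
      · exfalso; have := pvM1 q hb; have := hmin q hq; omega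
    have n2 : ∀ q ∈ p :: ps, pvTierMatch ["director", "head of", "vp"] q = false := by
      intro q hq
      cases hb : pvTierMatch ["director", "head of", "vp"] q
      · rfl
      · exfalso; have := pvM2 q hb; have := hmin q hq; omega
    have n3 : ∀ q ∈ p :: ps, pvTierMatch ["manager"] q = false := by
      intro q hq
      cases hb : pvTierMatch ["manager"] q
      · rfl
      · exfalso; have := pvM3 q hb; have := hmin q hq; omega
    have e0 : (p :: ps).find? (fun q => pvTierMatch ["founder", "co-founder", "cofounder", "owner"] q) = none :=
      List.find?_eq_none.mpr (fun q hq => by simp [n0 q hq])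
    have e1 : (p :: ps).find? (fun q => pvTierMatch ["ceo", "chief executive", "president"] q) = none :=
      List.find?_eq_none.mpr (fun q hq => by simp [n1 q hq])
    have e2 : (p :: ps).find? (fun q => pvTierMatch ["director", "head of", "vp"] q) = none :=
      List.find?_eq_none.mpr (fun q hq => by simp [n2 q hq])
    have e3 : (p :: ps).find? (fun q => pvTierMatch ["manager"] q) = none :=
      List.find?_eq_none.mpr (fun q hq => by simp [n3 q hq])
    have hfmp : pvFm p ps = p := pvFm_self ps p (fun x hx => by
      have h1 := hmin x (by simp [hx])
      have h2 := pvScore_le_4 p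
      omega)
    simp only [e0, e1, e2, e3, hfmp]

-- ===== VERDICT (by name: the statement is the Claim_ definition above) =====
theorem pick_best_person_spec : Claim_equal_pick_best_person := by
  intro people _
  show pick_best_person people = pick_best_person_alt people
  cases people with
  | nil => rfl
  | cons p ps => rw [pvA_eq_fm p ps, pvB_eq_fm p ps]
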